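-- pv_equiv track=rewrite | github.com/ScrapeExchange/scrape-python | tools/cleanup_channel_list.py | _split_header_and_entries
-- ===== SOURCE A (Python) =====
-- def _split_header_and_entries(
--     raw_lines: list[str],
-- ) -> tuple[list[str], list[str]]:
--     '''
--     Split *raw_lines* into a header (leading comment and blank
--     lines, preserved verbatim) and the list of stripped data
--     entries that should be processed.
--     '''
--
--     header: list[str] = []
--     entries: list[str] = []
--     in_header: bool = True
--
--     for raw in raw_lines:
--         stripped: str = raw.strip()
--         if not stripped or stripped.startswith('#'):
--             if in_header:
--                 header.append(raw.rstrip('\n'))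
--             continue
--         in_header = False
--         entries.append(stripped)
--
--     return header, entries
-- ===== SOURCE B (Python) =====
-- def _is_header_line(raw):
--     s = raw.strip()
--     return not s or s.startswith('#')
--
--
-- def _split_header_and_entries(raw_lines):
--     # header: leading run of blank/comment lines only (prefix scan with break)
--     header = []
--     for raw in raw_lines:
--         if not _is_header_line(raw):
--             break
--         header.append(raw.rstrip('\n'))
--     # entries: independent global filter of the whole list
--     entries = [raw.strip() for raw in raw_lines if not _is_header_line(raw)]
--     return header, entries
-- ===== Notes on version B (the rewrite author's own statement) =====
-- stated objective: idiomatic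
-- what changed: Replaced the single stateful loop with an in_header flag by two independent passes: a prefix scan (takewhile-style, with break) that collects the header, and a global filter that collects the stripped entries.
import Mathlib
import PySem

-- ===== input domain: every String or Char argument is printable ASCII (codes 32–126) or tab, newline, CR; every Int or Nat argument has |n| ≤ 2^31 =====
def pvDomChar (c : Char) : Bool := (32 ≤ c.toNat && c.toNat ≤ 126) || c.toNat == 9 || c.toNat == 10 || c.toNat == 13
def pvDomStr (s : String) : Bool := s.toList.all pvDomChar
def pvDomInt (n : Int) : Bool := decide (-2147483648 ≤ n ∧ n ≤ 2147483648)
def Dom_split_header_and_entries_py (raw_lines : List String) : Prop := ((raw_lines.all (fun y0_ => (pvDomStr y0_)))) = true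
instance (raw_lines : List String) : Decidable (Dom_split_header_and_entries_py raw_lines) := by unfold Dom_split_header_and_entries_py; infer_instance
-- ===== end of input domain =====

-- B replaces A's stateful in_header flag loop with a prefix scan for the header
-- plus an independent global filter for the entries (objective: idiomatic).


-- ===== PORT A =====
-- raw.rstrip('\n'): strip newline characters from the right end only
-- (ported by hand: PySem has no single-sided strip-with-chars; exact for this call)
def pvRstripNl (s : String) : String :=
  String.ofList ((s.toList.reverse.dropWhile (fun c => c == '\n')).reverse)

-- one iteration of A's for-loop over the state (header, entries, in_header)
def pvStepA (st : List String × List String × Bool) (raw : String) :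
    List String × List String × Bool :=
  let stripped := PySem.Str.strip raw
  if stripped == "" || PySem.Str.startswith stripped "#" then
    if st.2.2 then (st.1 ++ [pvRstripNl raw], st.2.1, st.2.2) else st
  else
    (st.1, st.2.1 ++ [stripped], false)

def split_header_and_entries_py (raw_lines : List String) : List String × List String :=
  let st := raw_lines.foldl pvStepA ([], [], true)
  (st.1, st.2.1)

-- ===== PORT B =====
-- _is_header_line(raw)
def pvIsHeaderLine (raw : String) : Bool :=
  let s := PySem.Str.strip raw
  s == "" || PySem.Str.startswith s "#"

-- body of B's entries comprehension: strip raw when it is not a header line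
def pvEntry (raw : String) : Option String :=
  if pvIsHeaderLine raw then none else some (PySem.Str.strip raw)

def split_header_and_entries_py_alt (raw_lines : List String) : List String × List String :=
  ((raw_lines.takeWhile pvIsHeaderLine).map pvRstripNl,
   raw_lines.filterMap pvEntry)

-- ===== PRECONDITION & SPEC =====
def Spec_split_header_and_entries_py (raw_lines : List String) (out : List String × List String) : Prop := out = split_header_and_entries_py_alt raw_lines
instance (raw_lines : List String) (out : List String × List String) : Decidable (Spec_split_header_and_entries_py raw_lines out) := by unfold Spec_split_header_and_entries_py; infer_instance

-- ===== CLAIM (what is proved, stated in full; the proofs are below) =====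
def Claim_equal_split_header_and_entries_py : Prop := ∀ (raw_lines : List String), Dom_split_header_and_entries_py raw_lines → Spec_split_header_and_entries_py raw_lines (split_header_and_entries_py raw_lines)

-- ===== LEMMAS AND PROOFS =====

-- once in_header is False, the header is frozen and the loop only appends the entries
lemma foldA_false (xs : List String) : ∀ (h e : List String),
    List.foldl pvStepA (h, e, false) xs = (h, e ++ xs.filterMap pvEntry, false) := by
  induction xs with
  | nil => intro h e; simp
  | cons x xs ih =>
    intro h e
    rw [List.foldl_cons, List.filterMap_cons]
    by_cases hx : pvIsHeaderLine x = true
    · have hx' := hx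
      simp only [pvIsHeaderLine, Bool.or_eq_true] at hx'
      simp at hx'
      have hs : pvStepA (h, e, false) x = (h, e, false) := by
        rcases hx' with hx' | hx' <;> simp [pvStepA, hx']
      rw [hs, ih, pvEntry, if_pos hx]
    · have hx' := hx
      simp [pvIsHeaderLine, not_or] at hx'
      have hs : pvStepA (h, e, false) x = (h, e ++ [PySem.Str.strip x], false) := by
        simp [pvStepA, hx'.1, hx'.2]
      rw [hs, ih, pvEntry, if_neg hx]
      simp

-- while in_header is True, the loop builds the takeWhile-prefix header and the filtered entries
lemma foldA_true (xs : List String) : ∀ (h e : List String),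
    List.foldl pvStepA (h, e, true) xs =
      (h ++ (xs.takeWhile pvIsHeaderLine).map pvRstripNl,
       e ++ xs.filterMap pvEntry, xs.all pvIsHeaderLine) := by
  induction xs with
  | nil => intro h e; simp
  | cons x xs ih =>
    intro h e
    rw [List.foldl_cons, List.takeWhile_cons, List.filterMap_cons, List.all_cons]
    by_cases hx : pvIsHeaderLine x = true
    · have hx' := hx
      simp only [pvIsHeaderLine, Bool.or_eq_true] at hx'
      simp at hx'
      have hs : pvStepA (h, e, true) x = (h ++ [pvRstripNl x], e, true) := by
        rcases hx' with hx' | hx' <;> simp [pvStepA, hx']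
      rw [hs, ih, pvEntry, if_pos hx, hx]
      simp
    · have hx' := hx
      simp [pvIsHeaderLine, not_or] at hx'
      have hs : pvStepA (h, e, true) x = (h, e ++ [PySem.Str.strip x], false) := by
        simp [pvStepA, hx'.1, hx'.2]
      rw [hs, foldA_false, pvEntry, if_neg hx]
      simp [hx]

-- ===== VERDICT (by name: the statement is the Claim_ definition above) =====
theorem split_header_and_entries_py_spec : Claim_equal_split_header_and_entries_py := by
  intro raw_lines _
  unfold Spec_split_header_and_entries_py split_header_and_entries_py split_header_and_entries_py_alt
  rw [foldA_true]
  simp
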